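-- pv_equiv track=rewrite | github.com/lukegeer/bsp_surgical | src/bsp_surgical/training/feature_dataset.py | _find_episode
-- ===== SOURCE A (Python) =====
-- def _find_episode(starts: list[int], idx: int) -> int:
--     lo, hi = 0, len(starts) - 1
--     while lo < hi:
--         mid = (lo + hi + 1) // 2
--         if starts[mid] <= idx:
--             lo = mid
--         else:
--             hi = mid - 1
--     return lo
-- ===== SOURCE B (Python) =====
-- def _find_episode(starts: list[int], idx: int) -> int:
--     result = 0
--     for i, s in enumerate(starts):
--         if s <= idx:
--             result = i
--     return result
-- ===== Notes on version B (the rewrite author's own statement) =====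
-- stated objective: simpler
-- what changed: Replaces the clamp-to-0 binary search over [lo,hi] with a single forward scan that records the last index whose start is <= idx (default 0); equal on sorted start lists, which is the binary search's contract.
-- outside the precondition, e.g. on _find_episode([0, 5, 0], 3): A returns 0, B returns 2
import Mathlib
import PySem

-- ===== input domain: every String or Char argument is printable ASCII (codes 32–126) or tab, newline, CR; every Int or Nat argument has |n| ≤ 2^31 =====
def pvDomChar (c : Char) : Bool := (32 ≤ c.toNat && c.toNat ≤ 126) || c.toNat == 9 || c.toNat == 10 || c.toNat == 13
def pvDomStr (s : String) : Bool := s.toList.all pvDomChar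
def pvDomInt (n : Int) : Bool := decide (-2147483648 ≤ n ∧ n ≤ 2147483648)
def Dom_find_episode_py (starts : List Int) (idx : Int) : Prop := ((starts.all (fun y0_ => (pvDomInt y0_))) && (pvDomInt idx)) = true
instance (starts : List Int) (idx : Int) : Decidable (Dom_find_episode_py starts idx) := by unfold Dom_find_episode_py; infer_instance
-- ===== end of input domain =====

-- B replaces the binary search by a single forward scan recording the last index whose
-- start is ≤ idx (default 0); equal on sorted start lists (the binary search's contract).

-- ===== PORT A =====
-- while lo < hi: mid = (lo+hi+1)//2; if starts[mid] <= idx: lo = mid else: hi = mid-1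
-- (fuel = len(starts) only makes the loop total; it bounds the halving iterations.)
def pvLoopA (starts : List Int) (idx : Int) : Nat → Int → Int → Int
  | 0, lo, _hi => lo
  | Nat.succ n, lo, hi =>
    if lo < hi then
      if PySem.List.pyGetD starts (PySem.Int.floordiv (lo + hi + 1) 2) 0 ≤ idx then
        pvLoopA starts idx n (PySem.Int.floordiv (lo + hi + 1) 2) hi
      else pvLoopA starts idx n lo (PySem.Int.floordiv (lo + hi + 1) 2 - 1)
    else lo

def find_episode_py (starts : List Int) (idx : Int) : Int :=
  pvLoopA starts idx starts.length 0 ((starts.length : Int) - 1)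

-- ===== PORT B =====
-- result = 0; for i, s in enumerate(starts): if s <= idx: result = i
def find_episode_py_alt (starts : List Int) (idx : Int) : Int :=
  (PySem.List.enumerate starts 0).foldl (fun r p => if p.2 ≤ idx then p.1 else r) 0

-- ===== PRECONDITION & SPEC =====
-- Pre_ excludes inputs where the predicate 'start ≤ idx' is not downward-closed along the
-- list (possible only for unsorted starts): there A's binary-search answer depends on the
-- accidental probe order of the halving and is an artefact of the implementation
-- (the function's purpose — locate the episode containing idx — presumes sorted starts).
def Pre_find_episode_py (starts : List Int) (idx : Int) : Prop :=
  List.IsChain (fun a b => b ≤ idx → a ≤ idx) starts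
instance (starts : List Int) (idx : Int) : Decidable (Pre_find_episode_py starts idx) := by
  unfold Pre_find_episode_py; infer_instance

def pvWitness_find_episode_py : List Int × Int := ([0, 2, 5], 3)

def Spec_find_episode_py (starts : List Int) (idx : Int) (out : Int) : Prop :=
  out = find_episode_py_alt starts idx
instance (starts : List Int) (idx : Int) (out : Int) : Decidable (Spec_find_episode_py starts idx out) := by
  unfold Spec_find_episode_py; infer_instance

-- ===== CLAIM (what is proved, stated in full; the proofs are below) =====
def Claim_equal_find_episode_py : Prop := ∀ (starts : List Int) (idx : Int), Dom_find_episode_py starts idx → Pre_find_episode_py starts idx → Spec_find_episode_py starts idx (find_episode_py starts idx)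

-- ===== LEMMAS AND PROOFS =====

-- B over xs ++ [x]: the last element wins if it qualifies.
theorem pvBalt_append (xs : List Int) (x idx r : Int) :
    (PySem.List.enumerate (xs ++ [x]) 0).foldl (fun r p => if p.2 ≤ idx then p.1 else r) r
      = if x ≤ idx then (xs.length : Int)
        else (PySem.List.enumerate xs 0).foldl (fun r p => if p.2 ≤ idx then p.1 else r) r := by
  rw [PySem.List.enumerate_append, List.foldl_append]
  simp [PySem.List.enumerate]

-- B returns the last good index when one exists.
theorem pvBalt_last (starts : List Int) (idx : Int) (j : Nat) (r : Int)
    (hj : j < starts.length) (hgood : starts[j] ≤ idx)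
    (hlast : ∀ k (hk : k < starts.length), starts[k] ≤ idx → k ≤ j) :
    (PySem.List.enumerate starts 0).foldl (fun r p => if p.2 ≤ idx then p.1 else r) r = j := by
  induction starts using List.reverseRecOn generalizing j r with
  | nil => simp at hj
  | append_singleton xs x ih =>
    rw [pvBalt_append]
    by_cases hx : x ≤ idx
    · simp only [hx, if_true]
      have hxlen : xs.length ≤ j := by
        have := hlast xs.length (by simp) (by simpa using hx)
        exact this
      have : j = xs.length := by
        have : j < xs.length + 1 := by simpa using hj
        omega
      simp [this]
    · simp only [hx, if_false]
      have hjlt : j < xs.length := by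
        rcases Nat.lt_or_ge j xs.length with h | h
        · exact h
        · exfalso
          have : j = xs.length := by
            have : j < xs.length + 1 := by simpa using hj
            omega
          subst this
          have : (xs ++ [x])[xs.length]'(by simp) = x := by
            simp
          rw [this] at hgood
          exact hx hgood
      apply ih j r hjlt
      · have : (xs ++ [x])[j]'(by simpa using hj) = xs[j] := by
          simp [List.getElem_append_left hjlt]
        rw [this] at hgood; exact hgood
      · intro k hk hgk
        apply hlast k (by simp; omega)
        have : (xs ++ [x])[k]'(by simp; omega) = xs[k] := by
          simp [List.getElem_append_left hk]
        rw [this]; exact hgk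

-- B keeps the default when no element qualifies.
theorem pvBalt_none (starts : List Int) (idx : Int) (r : Int)
    (h : ∀ k (hk : k < starts.length), ¬ starts[k] ≤ idx) :
    (PySem.List.enumerate starts 0).foldl (fun r p => if p.2 ≤ idx then p.1 else r) r = r := by
  induction starts using List.reverseRecOn generalizing r with
  | nil => simp [PySem.List.enumerate]
  | append_singleton xs x ih =>
    rw [pvBalt_append]
    have hx : ¬ x ≤ idx := by
      have := h xs.length (by simp)
      simpa using this
    simp only [hx, if_false]
    apply ih
    intro k hk
    have := h k (by simp; omega)
    have heq : (xs ++ [x])[k]'(by simp; omega) = xs[k] := by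
      simp [List.getElem_append_left hk]
    rw [heq] at this; exact this

-- downward closure of 'start ≤ idx' along the chain
theorem pvDown (starts : List Int) (idx : Int)
    (h : List.IsChain (fun a b => b ≤ idx → a ≤ idx) starts) :
    ∀ (d a b : Nat) (h1 : b - a ≤ d) (h2 : a ≤ b) (hb : b < starts.length),
      starts[b] ≤ idx → starts[a]'(by omega) ≤ idx := by
  intro d
  induction d with
  | zero =>
    intro a b h1 h2 hb hg
    have : a = b := by omega
    subst this; exact hg
  | succ d ih =>
    intro a b h1 h2 hb hg
    by_cases hab : a = b
    · subst hab; exact hg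
    · have hb1 : b - 1 + 1 < starts.length := by omega
      have step := (List.isChain_iff_getElem.mp h) (b - 1) hb1
      have e : starts[b - 1 + 1]'(by omega) = starts[b] := by congr 1; omega
      rw [e] at step
      exact ih a (b - 1) (by omega) (by omega) (by omega) (step hg)

-- A's loop returns the last good index when one exists (sorted input).
theorem pvLoopA_last (starts : List Int) (idx : Int)
    (hs : List.IsChain (fun a b => b ≤ idx → a ≤ idx) starts) (j : Nat)
    (hj : j < starts.length) (hgood : starts[j] ≤ idx)
    (hlast : ∀ k (hk : k < starts.length), starts[k] ≤ idx → k ≤ j) :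
    ∀ (n : Nat) (lo hi : Int), (hi - lo).toNat ≤ n →
      0 ≤ lo → lo ≤ (j : Int) → (j : Int) ≤ hi → hi ≤ (starts.length : Int) - 1 →
      pvLoopA starts idx n lo hi = j := by
  intro n
  induction n with
  | zero =>
    intro lo hi hm h0 hlo hhi hbound
    simp only [pvLoopA]
    omega
  | succ n ih =>
    intro lo hi hm h0 hlo hhi hbound
    simp only [pvLoopA]
    by_cases hlt : lo < hi
    · simp only [hlt, if_true]
      have h2 : PySem.Int.floordiv (lo + hi + 1) 2 = (lo + hi + 1) / 2 :=
        PySem.Int.floordiv_eq_ediv_of_pos (by omega)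
      set mid := PySem.Int.floordiv (lo + hi + 1) 2 with hmid
      have hmlo : lo < mid := by omega
      have hmhi : mid ≤ hi := by omega
      have hm0 : 0 ≤ mid := by omega
      have hmlen : mid < (starts.length : Int) := by omega
      have hget : PySem.List.pyGetD starts mid 0 = starts[mid.toNat]'(by omega) :=
        PySem.List.pyGetD_eq_getElem starts 0 hm0 hmlen
      by_cases hc : PySem.List.pyGetD starts mid 0 ≤ idx
      · simp only [hc, if_true]
        have hmj : mid ≤ (j : Int) := by
          have := hlast mid.toNat (by omega) (by rw [← hget]; exact hc)
          omega
        exact ih mid hi (by omega) (by omega) hmj hhi hbound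
      · simp only [hc, if_false]
        have hjm : (j : Int) < mid := by
          by_contra hcon
          push_neg at hcon
          have hmt : mid.toNat ≤ j := by omega
          have : starts[mid.toNat]'(by omega) ≤ idx :=
            pvDown starts idx hs (j - mid.toNat) mid.toNat j (by omega) hmt hj hgood
          rw [← hget] at this
          exact hc this
        exact ih lo (mid - 1) (by omega) h0 hlo (by omega) (by omega)
    · simp only [hlt, if_false]
      omega

-- A's loop keeps lo = 0 when no element qualifies.
theorem pvLoopA_none (starts : List Int) (idx : Int)
    (h : ∀ k (hk : k < starts.length), ¬ starts[k] ≤ idx) :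
    ∀ (n : Nat) (hi : Int), hi ≤ (starts.length : Int) - 1 →
      pvLoopA starts idx n 0 hi = 0 := by
  intro n
  induction n with
  | zero =>
    intro hi hbound
    simp only [pvLoopA]
  | succ n ih =>
    intro hi hbound
    simp only [pvLoopA]
    by_cases hlt : (0 : Int) < hi
    · simp only [hlt, if_true]
      have h2 : PySem.Int.floordiv (0 + hi + 1) 2 = (0 + hi + 1) / 2 :=
        PySem.Int.floordiv_eq_ediv_of_pos (by omega)
      set mid := PySem.Int.floordiv (0 + hi + 1) 2 with hmid
      have hmlo : 0 < mid := by omega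
      have hmhi : mid ≤ hi := by omega
      have hmlen : mid < (starts.length : Int) := by omega
      have hget : PySem.List.pyGetD starts mid 0 = starts[mid.toNat]'(by omega) :=
        PySem.List.pyGetD_eq_getElem starts 0 (by omega) hmlen
      have hc : ¬ PySem.List.pyGetD starts mid 0 ≤ idx := by
        rw [hget]; exact h mid.toNat (by omega)
      simp only [hc, if_false]
      exact ih (mid - 1) (by omega)
    · simp [hlt]

-- ===== VERDICT (by name: the statement is the Claim_ definition above) =====
theorem find_episode_py_spec : Claim_equal_find_episode_py := by
  intro starts idx _ hpre
  unfold Spec_find_episode_py find_episode_py find_episode_py_alt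
  by_cases hx : ∃ k, ∃ hk : k < starts.length, starts[k] ≤ idx
  · obtain ⟨k, hk, hgk⟩ := hx
    classical
    set P : Nat → Prop := fun m => m < starts.length ∧ starts.getD m 0 ≤ idx with hP
    have hPk : P k := ⟨hk, by rw [List.getD_eq_getElem starts 0 hk]; exact hgk⟩
    have hklen : k ≤ starts.length - 1 := by omega
    set j := Nat.findGreatest P (starts.length - 1) with hj
    have hPj : P j := Nat.findGreatest_spec hklen hPk
    obtain ⟨hjlt, hjgood⟩ := hPj
    have hjgood' : starts[j] ≤ idx := by
      rw [List.getD_eq_getElem starts 0 hjlt] at hjgood; exact hjgood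
    have hlast : ∀ m (hm : m < starts.length), starts[m] ≤ idx → m ≤ j := by
      intro m hm hgm
      exact Nat.le_findGreatest (by omega) ⟨hm, by rw [List.getD_eq_getElem starts 0 hm]; exact hgm⟩
    rw [pvLoopA_last starts idx hpre j hjlt hjgood' hlast
          starts.length 0 ((starts.length : Int) - 1)
          (by omega) (le_refl _) (by omega) (by omega) (le_refl _),
        pvBalt_last starts idx j 0 hjlt hjgood' hlast]
  · push_neg at hx
    have hx' : ∀ k (hk : k < starts.length), ¬ starts[k] ≤ idx :=
      fun k hk => Int.not_le.mpr (hx k hk)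
    rw [pvLoopA_none starts idx hx' starts.length _ (le_refl _),
        pvBalt_none starts idx 0 hx']
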